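-- pv_equiv track=rewrite | github.com/sheilsplenbluli/csvwrangler | csvwrangler/lag.py | lead_column
-- ===== SOURCE A (Python) =====
-- from typing import List, Dict, Any, Optional
--
-- def lead_column(
--     rows: List[Dict[str, Any]],
--     column: str,
--     periods: int = 1,
--     dest: Optional[str] = None,
--     fill: str = "",
-- ) -> List[Dict[str, Any]]:
--     """Add a lead version of *column* (shifted backward by *periods* rows)."""
--     if periods < 1:
--         raise ValueError("periods must be >= 1")
--     dest = dest or f"{column}_lead{periods}"
--     result = []
--     for i, row in enumerate(rows):
--         new_row = dict(row)
--         src_index = i + periods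
--         if src_index >= len(rows):
--             new_row[dest] = fill
--         else:
--             new_row[dest] = rows[src_index].get(column, fill)
--         result.append(new_row)
--     return result
-- ===== SOURCE B (Python) =====
-- from typing import List, Dict, Any, Optional
--
-- def lead_column(
--     rows: List[Dict[str, Any]],
--     column: str,
--     periods: int = 1,
--     dest: Optional[str] = None,
--     fill: str = "",
-- ) -> List[Dict[str, Any]]:
--     """Add a lead version of *column* (shifted backward by *periods* rows).
--
--     Single reverse pass: walk the rows from last to first keeping a sliding
--     window of the column values of the `periods` rows that follow the current
--     one; the lead value of a row is the oldest entry of a full window (fill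
--     otherwise).  The output is accumulated backwards and reversed at the end.
--     """
--     if periods < 1:
--         raise ValueError("periods must be >= 1")
--     dest = dest or f"{column}_lead{periods}"
--     out = []
--     window = []  # column values of the rows after the current one, farthest first
--     for row in reversed(rows):
--         new_row = dict(row)
--         new_row[dest] = window[0] if len(window) == periods else fill
--         out.append(new_row)
--         window.append(row.get(column, fill))
--         if len(window) > periods:
--             window.pop(0)
--     out.reverse()
--     return out
-- ===== Notes on version B (the rewrite author's own statement) =====
-- stated objective: alternative
-- what changed: B traverses the rows in reverse with a sliding window holding the column values of the periods rows following the current one (the lead value is the oldest window entry when the window is full, fill otherwise), accumulating the output backwards and reversing it at the end, instead of A's forward index loop that bounds-checks rows[i+periods] on every row.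
import Mathlib
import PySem

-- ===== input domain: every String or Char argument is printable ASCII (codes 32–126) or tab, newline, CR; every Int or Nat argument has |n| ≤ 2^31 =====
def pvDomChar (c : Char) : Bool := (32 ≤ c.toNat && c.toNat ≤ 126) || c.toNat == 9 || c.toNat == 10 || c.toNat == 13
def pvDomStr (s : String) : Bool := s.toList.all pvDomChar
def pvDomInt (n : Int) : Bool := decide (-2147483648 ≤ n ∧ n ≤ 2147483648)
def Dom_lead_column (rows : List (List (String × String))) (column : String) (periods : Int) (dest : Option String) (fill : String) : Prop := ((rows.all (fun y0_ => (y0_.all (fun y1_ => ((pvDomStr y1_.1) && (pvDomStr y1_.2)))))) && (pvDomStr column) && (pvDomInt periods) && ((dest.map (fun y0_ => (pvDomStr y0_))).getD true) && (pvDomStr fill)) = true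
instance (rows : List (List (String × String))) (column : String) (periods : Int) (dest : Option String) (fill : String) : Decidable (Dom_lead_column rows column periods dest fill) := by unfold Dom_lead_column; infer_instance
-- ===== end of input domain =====

-- B traverses the rows in reverse with a sliding window of the next `periods` column values
-- (accumulating the output backwards), instead of A's forward index loop that bounds-checks
-- rows[i+periods]. Objective: alternative algorithm of the same cost.

-- ===== PORT A =====
-- dest = dest or f"{column}_lead{periods}"  (Python 'or': None and "" are falsy)
def pvDest_lead (column : String) (periods : Int) (dest : Option String) : String :=
  match dest with
  | none => column ++ "_lead" ++ PySem.Int.toStr periods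
  | some s => if s = "" then column ++ "_lead" ++ PySem.Int.toStr periods else s

def lead_column (rows : List (List (String × String))) (column : String) (periods : Int) (dest : Option String) (fill : String) : List (List (String × String)) :=
  if periods < 1 then []  -- Python raises ValueError here; excluded by Pre_lead_column
  else
    let destS := pvDest_lead column periods dest
    (PySem.List.enumerate rows).foldl
      (fun result ir =>
        result ++
          [ if ir.1 + periods ≥ (rows.length : Int) then
              ((PySem.Dict.mk ir.2).insert destS fill).items
            else
              ((PySem.Dict.mk ir.2).insert destS
                ((PySem.Dict.mk (PySem.List.pyGetD rows (ir.1 + periods) [])).getD column fill)).items ])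
      []

-- ===== PORT B =====
-- reverse pass: state = (out, window); window holds the column values of the rows already
-- processed (the rows after the current one), farthest first; out is reversed at the end.
def lead_column_alt (rows : List (List (String × String))) (column : String) (periods : Int) (dest : Option String) (fill : String) : List (List (String × String)) :=
  if periods < 1 then []  -- Python raises ValueError here; excluded by Pre_lead_column
  else
    let destS := pvDest_lead column periods dest
    let st := rows.reverse.foldl
      (fun (st : List (List (String × String)) × List String) row =>
        let lead := if (st.2.length : Int) = periods then st.2.headD fill else fill
        let out := st.1 ++ [((PySem.Dict.mk row).insert destS lead).items]
        let win := st.2 ++ [(PySem.Dict.mk row).getD column fill]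
        (out, if (win.length : Int) > periods then win.tail else win))
      ([], [])
    st.1.reverse

-- ===== PRECONDITION & SPEC =====
-- Python A raises ValueError when periods < 1; that is the only exception it can raise.
def Pre_lead_column (rows : List (List (String × String))) (column : String) (periods : Int) (dest : Option String) (fill : String) : Prop := 1 ≤ periods
instance (rows : List (List (String × String))) (column : String) (periods : Int) (dest : Option String) (fill : String) : Decidable (Pre_lead_column rows column periods dest fill) := by unfold Pre_lead_column; infer_instance
def pvWitness_lead_column : (List (List (String × String))) × String × Int × Option String × String :=
  ([[("x", "1"), ("y", "a")], [("x", "2")]], "x", 1, none, "")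

def Spec_lead_column (rows : List (List (String × String))) (column : String) (periods : Int) (dest : Option String) (fill : String) (out : List (List (String × String))) : Prop := out = lead_column_alt rows column periods dest fill
instance (rows : List (List (String × String))) (column : String) (periods : Int) (dest : Option String) (fill : String) (out : List (List (String × String))) : Decidable (Spec_lead_column rows column periods dest fill out) := by unfold Spec_lead_column; infer_instance

-- ===== CLAIM (what is proved, stated in full; the proofs are below) =====
def Claim_equal_lead_column : Prop := ∀ (rows : List (List (String × String))) (column : String) (periods : Int) (dest : Option String) (fill : String), Dom_lead_column rows column periods dest fill → Pre_lead_column rows column periods dest fill → Spec_lead_column rows column periods dest fill (lead_column rows column periods dest fill)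

-- ===== LEMMAS AND PROOFS =====

theorem getElem_enum {α : Type} (xs : List α) (s : Int) (i : Nat)
    (h2 : i < (PySem.List.enumerate xs s).length) :
    (PySem.List.enumerate xs s)[i] =
      (s + (i : Int), xs[i]'(by simpa [PySem.List.length_enumerate] using h2)) := by
  induction xs generalizing s i with
  | nil => simp [PySem.List.enumerate_nil] at h2
  | cons x xs ih =>
    cases i with
    | zero => simp [PySem.List.enumerate_cons]
    | succ j =>
      have h' : j < (PySem.List.enumerate xs (s + 1)).length := by
        simp [PySem.List.length_enumerate] at h2 ⊢; omega
      simp only [PySem.List.enumerate_cons, List.getElem_cons_succ]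
      rw [ih (s + 1) j h']
      simp only [Prod.mk.injEq]
      exact ⟨by push_cast; ring, trivial⟩

-- the column value of a row
def pvVal (column fill : String) (r : List (String × String)) : String :=
  (PySem.Dict.mk r).getD column fill

-- the lead value a row gets when the rows after it are `t`
def pvLead (column fill : String) (p : Nat) (t : List (List (String × String))) : String :=
  if p ≤ t.length then pvVal column fill (t.getD (p - 1) []) else fill

-- the output of B's loop, in original row order
def pvOut (destS column fill : String) (p : Nat) :
    List (List (String × String)) → List (List (String × String))
  | [] => []
  | r :: t =>
      ((PySem.Dict.mk r).insert destS (pvLead column fill p t)).items ::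
        pvOut destS column fill p t

theorem pvOut_length (destS column fill : String) (p : Nat)
    (l : List (List (String × String))) : (pvOut destS column fill p l).length = l.length := by
  induction l with
  | nil => rfl
  | cons r t ih => simp [pvOut, ih]

theorem pvOut_getElem (destS column fill : String) (p : Nat)
    (l : List (List (String × String))) (j : Nat) (hj : j < l.length) :
    (pvOut destS column fill p l)[j]'(by rw [pvOut_length]; exact hj) =
      ((PySem.Dict.mk (l[j])).insert destS (pvLead column fill p (l.drop (j + 1)))).items := by
  induction l generalizing j with
  | nil => simp at hj
  | cons r t ih =>
    cases j with
    | zero => simp [pvOut]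
    | succ k =>
      have hk : k < t.length := by simpa using hj
      simp only [pvOut, List.getElem_cons_succ, List.drop_succ_cons]
      exact ih k hk

-- characterisation of B's reverse fold
theorem lead_fold_char (destS column fill : String) (periods : Int) (p : Nat)
    (hp : 1 ≤ p) (hpc : periods = (p : Int))
    (l : List (List (String × String))) :
    l.reverse.foldl
      (fun (st : List (List (String × String)) × List String) row =>
        let lead := if (st.2.length : Int) = periods then st.2.headD fill else fill
        let out := st.1 ++ [((PySem.Dict.mk row).insert destS lead).items]
        let win := st.2 ++ [(PySem.Dict.mk row).getD column fill]
        (out, if (win.length : Int) > periods then win.tail else win))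
      ([], []) =
      ((pvOut destS column fill p l).reverse, ((l.take p).map (pvVal column fill)).reverse) := by
  rw [List.foldl_reverse]
  induction l with
  | nil => simp [pvOut]
  | cons r t ih =>
    rw [List.foldr_cons, ih]
    simp only [Prod.mk.injEq]
    constructor
    · -- out component
      simp only [pvOut, List.reverse_cons]
      congr 2
      -- lead value: window full ⟺ p ≤ t.length
      by_cases hfull : p ≤ t.length
      · have hlen : (((t.take p).map (pvVal column fill)).reverse.length : Int) = periods := by
          simp [hpc]; omega
        rw [if_pos hlen]
        unfold pvLead
        rw [if_pos hfull]
        rw [List.headD_eq_head?_getD, List.head?_reverse]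
        have hgl : ((t.take p).map (pvVal column fill)).getLast? =
            some (pvVal column fill (t.getD (p - 1) [])) := by
          rw [List.getLast?_eq_getElem?]
          have hlen2 : ((t.take p).map (pvVal column fill)).length = p := by simp; omega
          rw [hlen2]
          have h1 : p - 1 < ((t.take p).map (pvVal column fill)).length := by omega
          rw [List.getElem?_eq_getElem h1]
          simp only [List.getElem_map]
          congr 1
          rw [List.getElem_take]
          rw [List.getD_eq_getElem?_getD, List.getElem?_eq_getElem (by omega)]
          rfl
        rw [hgl]; rfl
      · have hlen : ¬ ((((t.take p).map (pvVal column fill)).reverse.length : Int) = periods) := by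
          simp [hpc]; omega
        rw [if_neg hlen]
        unfold pvLead
        rw [if_neg hfull]
    · -- window component
      by_cases hfull : p ≤ t.length
      · have hgt : ((((t.take p).map (pvVal column fill)).reverse ++
            [(PySem.Dict.mk r).getD column fill]).length : Int) > periods := by
          simp [hpc]; omega
        rw [if_pos hgt]
        -- tail (reverse A ++ [x]) = reverse (dropLast A) ++ [x] when A ≠ []
        have hA : ((t.take p).map (pvVal column fill)) ≠ [] := by
          apply List.ne_nil_of_length_pos
          simp; omega
        have htk : (r :: t).take p = r :: t.take (p - 1) := by
          cases p with
          | zero => omega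
          | succ q => simp
        rw [htk]
        simp only [List.map_cons, List.reverse_cons]
        have hstep : (((t.take p).map (pvVal column fill)).reverse ++
            [(PySem.Dict.mk r).getD column fill]).tail =
            ((t.take (p - 1)).map (pvVal column fill)).reverse ++
              [(PySem.Dict.mk r).getD column fill] := by
          have hrev : ((t.take p).map (pvVal column fill)).reverse ≠ [] := by
            simpa using hA
          rw [List.tail_append_of_ne_nil hrev]
          congr 1
          rw [List.tail_reverse]
          congr 1
          rw [← List.map_dropLast, List.dropLast_eq_take, List.length_take, List.take_take]
          congr 2
          omega
        rw [hstep]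
        rfl
      · have hgt : ¬ (((((t.take p).map (pvVal column fill)).reverse ++
            [(PySem.Dict.mk r).getD column fill]).length : Int) > periods) := by
          simp only [List.length_append, List.length_reverse, List.length_map,
            List.length_take, List.length_cons]
          simp [hpc]; omega
        rw [if_neg hgt]
        have htk : (r :: t).take p = r :: t.take (p - 1) := by
          cases p with
          | zero => omega
          | succ q => simp
        rw [htk]
        have ht2 : t.take (p - 1) = t := List.take_of_length_le (by omega)
        have ht3 : t.take p = t := List.take_of_length_le (by omega)
        rw [ht2, ht3]
        simp [pvVal]

theorem lead_column_eq (rows : List (List (String × String))) (column : String)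
    (periods : Int) (dest : Option String) (fill : String) (hp : 1 ≤ periods) :
    lead_column rows column periods dest fill = lead_column_alt rows column periods dest fill := by
  have hlt : ¬ periods < 1 := by omega
  set p : Nat := periods.toNat with hpdef
  have hpc : periods = (p : Int) := (Int.toNat_of_nonneg (by omega)).symm
  have hp1 : 1 ≤ p := by omega
  unfold lead_column lead_column_alt
  simp only [hlt, if_false]
  set destS := pvDest_lead column periods dest
  rw [lead_fold_char destS column fill periods p hp1 hpc rows]
  simp only [List.reverse_reverse]
  rw [PySem.List.foldl_append_singleton_eq_map]
  apply List.ext_getElem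
  · simp [PySem.List.length_enumerate, pvOut_length]
  · intro i h1 h2
    simp only [List.nil_append] at h1 ⊢
    have hi : i < rows.length := by
      simpa [PySem.List.length_enumerate] using h1
    have hb : i < (PySem.List.enumerate rows 0).length := by
      simpa [PySem.List.length_enumerate] using hi
    simp only [List.getElem_map]
    rw [getElem_enum rows 0 i hb]
    simp only [Int.zero_add]
    rw [pvOut_getElem destS column fill p rows i hi]
    unfold pvLead
    have hdl : (rows.drop (i + 1)).length = rows.length - (i + 1) := by simp
    by_cases hc : (i : Int) + periods ≥ (rows.length : Int)
    · -- tail region: A writes fill, window is not full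
      rw [if_pos hc]
      have hnf : ¬ p ≤ (rows.drop (i + 1)).length := by rw [hdl]; omega
      rw [if_neg hnf]
    · -- body region
      have hlt2 : i + p < rows.length := by omega
      rw [if_neg hc]
      have hf : p ≤ (rows.drop (i + 1)).length := by rw [hdl]; omega
      rw [if_pos hf]
      have hidx : PySem.List.pyGetD rows ((i : Int) + periods) [] = rows[i + p] := by
        have hcast : (i : Int) + periods = ((i + p : Nat) : Int) := by rw [hpc]; push_cast; ring
        rw [hcast, PySem.List.pyGetD_natCast]
        simp [hlt2]
      rw [hidx]
      have hget : (rows.drop (i + 1)).getD (p - 1) [] = rows[i + p] := by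
        rw [List.getD_eq_getElem?_getD, List.getElem?_drop]
        have : i + 1 + (p - 1) = i + p := by omega
        rw [this, List.getElem?_eq_getElem hlt2]
        rfl
      rw [hget]
      rfl

-- ===== VERDICT (by name: the statement is the Claim_ definition above) =====
theorem lead_column_spec : Claim_equal_lead_column := by
  intro rows column periods dest fill _ hpre
  unfold Spec_lead_column
  exact lead_column_eq rows column periods dest fill hpre
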